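-- pv_equiv track=rewrite | github.com/xiongtx/aocpython | 2018/day8.py | root_value_at
-- ===== SOURCE A (Python) =====
-- def root_value_at(i, nums):
--     n_c = nums[i]
--     n_m = nums[i + 1]
--     if n_c == 0:
--         m_start = i + 2
--         m_end = m_start + n_m
--         return (sum(nums[m_start:m_end]), m_end)
--     else:
--         c_start = i + 2
--         c_totals = []
--         for _ in range(n_c):
--             c_total, c_start = root_value_at(c_start, nums)
--             c_totals.append(c_total)
--         metadata = nums[c_start:c_start + n_m]
--         total = sum(
--             c_totals[m - 1] for m in metadata if 0 < m <= len(c_totals))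
--         return (total, c_start + n_m)
-- ===== SOURCE B (Python) =====
-- def root_value_at(i, nums):
--     # Iterative stack machine instead of recursion: frames hold (n_c, n_m, child values).
--     stack = []
--     pos = i
--     while True:
--         n_c, n_m = nums[pos], nums[pos + 1]
--         pos += 2
--         stack.append((n_c, n_m, []))
--         while stack[-1][0] <= len(stack[-1][2]):
--             n_c, n_m, vals = stack.pop()
--             meta = nums[pos:pos + n_m]
--             pos += n_m
--             if n_c == 0:
--                 val = sum(meta)
--             else:
--                 val = sum(vals[m - 1] for m in meta if 0 < m <= len(vals))
--             if not stack:
--                 return (val, pos)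
--             stack[-1][2].append(val)
-- ===== Notes on version B (the rewrite author's own statement) =====
-- stated objective: alternative
-- what changed: A's recursive descent over the tree is replaced by an explicit stack machine: one cursor walks the list, frames of (n_c, n_m, collected child values) are pushed on header reads and popped/resolved as they complete, with no recursion.
-- outside the precondition, e.g. on root_value_at(0, [1, 0, 0, -1]): A returns (0, 3), B returns (0, 3); on root_value_at(0, [1, 0, 0, 5]): A returns (0, 9), B returns (0, 9); on root_value_at(-4, [1, 0, 0, 0]): A returns (0, 0), B returns (0, 0)
import Mathlib
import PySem

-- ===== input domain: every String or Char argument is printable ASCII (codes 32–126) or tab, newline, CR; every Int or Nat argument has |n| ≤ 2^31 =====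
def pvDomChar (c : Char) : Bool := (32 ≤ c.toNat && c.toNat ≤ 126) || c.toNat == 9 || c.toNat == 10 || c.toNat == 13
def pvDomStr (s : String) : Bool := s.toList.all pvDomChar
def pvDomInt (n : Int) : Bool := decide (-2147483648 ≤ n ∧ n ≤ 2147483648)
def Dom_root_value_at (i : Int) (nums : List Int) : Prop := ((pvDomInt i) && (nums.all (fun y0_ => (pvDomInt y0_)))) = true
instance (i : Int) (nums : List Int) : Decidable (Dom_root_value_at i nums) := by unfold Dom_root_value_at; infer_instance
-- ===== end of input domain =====

-- B replaces A's recursive descent by an explicit stack machine (one cursor, frames of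
-- pending child values); same return value on the stated domain, similar cost.

-- ===== PORT A =====
-- Literal port of A's recursion.  The fuel argument only makes the recursion total in Lean
-- (Python's recursion needs no fuel); on every input admitted by Pre_ the fuel never runs out
-- (proved below via the Pre_ checker, which consumes fuel in exactly the same pattern).
mutual
def goA (nums : List Int) : Nat → Int → Option (Int × Int)
  | 0, _ => none
  | f+1, i =>
    match PySem.List.pyGet? nums i, PySem.List.pyGet? nums (i+1) with   -- n_c = nums[i]; n_m = nums[i+1]
    | some n_c, some n_m =>
      if n_c = 0 then
        -- (sum(nums[m_start:m_end]), m_end)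
        some ((PySem.List.slice nums (some (i+2)) (some (i+2+n_m))).sum, i+2+n_m)
      else
        -- for _ in range(n_c): c_total, c_start = root_value_at(c_start, nums)
        match kidsA nums f n_c.toNat (i+2) with
        | none => none
        | some (c_totals, c_start) =>
          -- metadata = nums[c_start:c_start+n_m]; generator sum with bounds guard
          some ((PySem.List.slice nums (some c_start) (some (c_start+n_m))).foldl
                  (fun acc x => if 0 < x ∧ x ≤ (c_totals.length : Int) then acc + c_totals.getD (x-1).toNat 0 else acc) 0,
                c_start + n_m)
    | _, _ => none
def kidsA (nums : List Int) : Nat → Nat → Int → Option (List Int × Int)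
  | 0, _, _ => none
  | _+1, 0, p => some ([], p)
  | f+1, k+1, p =>
    match goA nums f p with
    | none => none
    | some (t, p') =>
      match kidsA nums f k p' with
      | none => none
      | some (ts, p'') => some (t :: ts, p'')
end

def root_value_at (i : Int) (nums : List Int) : Int × Int :=
  (goA nums (2*nums.length+2) i).getD (0, 0)

-- ===== PORT B =====
-- Port of Source B: an iterative stack machine.  resolveB is the inner `while` loop that pops
-- completed frames; goB is the outer `while True` loop (fuel = one unit per header read,
-- enough on every input admitted by Pre_, proved below).
def resolveB (nums : List Int) : Int → List (Int × Int × List Int) → (Int × Int) ⊕ (Int × List (Int × Int × List Int))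
  | pos, [] => Sum.inr (pos, [])
  | pos, (n_c, n_m, vals) :: rest =>
    if n_c ≤ (vals.length : Int) then      -- while stack[-1][0] <= len(stack[-1][2])
      let md := PySem.List.slice nums (some pos) (some (pos + n_m))
      let val := if n_c = 0 then md.sum else
        md.foldl (fun acc x => if 0 < x ∧ x ≤ (vals.length : Int) then acc + vals.getD (x-1).toNat 0 else acc) 0
      match rest with
      | [] => Sum.inl (val, pos + n_m)                                   -- return (val, pos)
      | (c2, m2, v2) :: r2 => resolveB nums (pos + n_m) ((c2, m2, v2 ++ [val]) :: r2)  -- stack[-1][2].append(val)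
    else Sum.inr (pos, (n_c, n_m, vals) :: rest)
termination_by _pos st => st.length
decreasing_by simp

def goB (nums : List Int) : Nat → Int → List (Int × Int × List Int) → Option (Int × Int)
  | 0, _, _ => none
  | f+1, pos, st =>
    match PySem.List.pyGet? nums pos, PySem.List.pyGet? nums (pos+1) with  -- n_c, n_m = nums[pos], nums[pos+1]
    | some n_c, some n_m =>
      match resolveB nums (pos+2) ((n_c, n_m, []) :: st) with              -- stack.append((n_c,n_m,[]))
      | Sum.inl ans => some ans
      | Sum.inr (p', st') => goB nums f p' st'
    | _, _ => none

def root_value_at_alt (i : Int) (nums : List Int) : Int × Int :=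
  (goB nums (nums.length+1) i []).getD (0, 0)

-- ===== PRECONDITION & SPEC =====
-- Grammar checker for Pre_: does nums, starting at position i, encode one well-formed
-- day-8 tree (0 ≤ i, both header numbers readable and nonnegative, children well formed,
-- metadata inside the buffer)?  It returns (value, end, node count); fuel 2*len+2 exceeds
-- the checker's call depth on every list, so it decides exactly that shape.
mutual
def chkT (nums : List Int) : Nat → Int → Option (Int × Int × Nat)
  | 0, _ => none
  | f+1, i =>
    match PySem.List.pyGet? nums i, PySem.List.pyGet? nums (i+1) with
    | some c, some m =>
      if 0 ≤ i ∧ 0 ≤ c ∧ 0 ≤ m then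
        match chkKids nums f c.toNat (i+2) with
        | none => none
        | some (vals, e, cs) =>
          if e + m ≤ (nums.length : Int) then
            some ((if c = 0 then (PySem.List.slice nums (some e) (some (e+m))).sum else
                    (PySem.List.slice nums (some e) (some (e+m))).foldl
                      (fun acc x => if 0 < x ∧ x ≤ (vals.length : Int) then acc + vals.getD (x-1).toNat 0 else acc) 0),
                  e + m, 1 + cs)
          else none
      else none
    | _, _ => none
def chkKids (nums : List Int) : Nat → Nat → Int → Option (List Int × Int × Nat)
  | 0, _, _ => none
  | _+1, 0, p => some ([], p, 0)
  | f+1, k+1, p =>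
    match chkT nums f p with
    | none => none
    | some (v, e1, c1) =>
      match chkKids nums f k e1 with
      | none => none
      | some (vs, e, cs) => some (v :: vs, e, c1 + cs)
end

-- Pre_: the root header nums[i], nums[i+1] is readable, and either the root has no children
-- to parse (count ≤ 0: A returns at once from the header and a clamped slice) or the region
-- from i+2 encodes that many well-formed day-8 subtrees (header counts nonnegative, every
-- read in range) — the function's natural domain.  A also returns accidental values on some
-- inputs with a positive root count but malformed child encodings; those are outside the
-- natural domain and excluded here (see the cites in claim.json).
def Pre_root_value_at (i : Int) (nums : List Int) : Prop :=
  (PySem.List.pyGet? nums i).isSome = true ∧ (PySem.List.pyGet? nums (i+1)).isSome = true ∧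
    (((PySem.List.pyGet? nums i).getD 0) ≤ 0 ∨
      (chkKids nums (2*nums.length+1) ((PySem.List.pyGet? nums i).getD 0).toNat (i+2)).isSome = true)
instance (i : Int) (nums : List Int) : Decidable (Pre_root_value_at i nums) := by
  unfold Pre_root_value_at; infer_instance

def pvWitness_root_value_at : Int × List Int := (0, [2,3,0,3,10,11,12,1,1,0,1,99,2,1,1,2])

def Spec_root_value_at (i : Int) (nums : List Int) (out : Int × Int) : Prop := out = root_value_at_alt i nums
instance (i : Int) (nums : List Int) (out : Int × Int) : Decidable (Spec_root_value_at i nums out) := by unfold Spec_root_value_at; infer_instance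

-- ===== CLAIM (what is proved, stated in full; the proofs are below) =====
def Claim_equal_root_value_at : Prop := ∀ (i : Int) (nums : List Int), Dom_root_value_at i nums → Pre_root_value_at i nums → Spec_root_value_at i nums (root_value_at i nums)

-- ===== LEMMAS AND PROOFS =====

-- one-step unfolding equations for B's machine, used to drive the simulation proof
theorem resolveB_cons (nums : List Int) (pos n_c n_m : Int) (vals : List Int)
    (rest : List (Int × Int × List Int)) :
    resolveB nums pos ((n_c, n_m, vals) :: rest) =
      if n_c ≤ (vals.length : Int) then
        (match rest with
         | [] => Sum.inl ((if n_c = 0 then (PySem.List.slice nums (some pos) (some (pos + n_m))).sum else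
             (PySem.List.slice nums (some pos) (some (pos + n_m))).foldl
               (fun acc x => if 0 < x ∧ x ≤ (vals.length : Int) then acc + vals.getD (x-1).toNat 0 else acc) 0), pos + n_m)
         | (c2, m2, v2) :: r2 => resolveB nums (pos + n_m) ((c2, m2, v2 ++ [(if n_c = 0 then (PySem.List.slice nums (some pos) (some (pos + n_m))).sum else
             (PySem.List.slice nums (some pos) (some (pos + n_m))).foldl
               (fun acc x => if 0 < x ∧ x ≤ (vals.length : Int) then acc + vals.getD (x-1).toNat 0 else acc) 0)]) :: r2))
      else Sum.inr (pos, (n_c, n_m, vals) :: rest) := by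
  rw [resolveB]

theorem goB_succ_some (nums : List Int) (f : Nat) (pos : Int) (st : List (Int × Int × List Int))
    (n_c n_m : Int) (h1 : PySem.List.pyGet? nums pos = some n_c)
    (h2 : PySem.List.pyGet? nums (pos+1) = some n_m) :
    goB nums (f+1) pos st =
      (match resolveB nums (pos+2) ((n_c, n_m, []) :: st) with
       | Sum.inl ans => some ans
       | Sum.inr (p', st') => goB nums f p' st') := by
  rw [goB, h1, h2]

theorem goA_succ_some (nums : List Int) (f : Nat) (i n_c n_m : Int)
    (h1 : PySem.List.pyGet? nums i = some n_c) (h2 : PySem.List.pyGet? nums (i+1) = some n_m) :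
    goA nums (f+1) i =
      (if n_c = 0 then
        some ((PySem.List.slice nums (some (i+2)) (some (i+2+n_m))).sum, i+2+n_m)
      else
        match kidsA nums f n_c.toNat (i+2) with
        | none => none
        | some (c_totals, c_start) =>
          some ((PySem.List.slice nums (some c_start) (some (c_start+n_m))).foldl
                  (fun acc x => if 0 < x ∧ x ≤ (c_totals.length : Int) then acc + c_totals.getD (x-1).toNat 0 else acc) 0,
                c_start + n_m)) := by
  rw [goA, h1, h2]

-- shape inversion for the checker
theorem chkT_inv (nums : List Int) (g : Nat) (i v e : Int) (cnt : Nat)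
    (h : chkT nums g i = some (v, e, cnt)) :
    ∃ g' c m vals ek cs, g = g' + 1
      ∧ PySem.List.pyGet? nums i = some c ∧ PySem.List.pyGet? nums (i+1) = some m
      ∧ (0 ≤ i ∧ 0 ≤ c ∧ 0 ≤ m)
      ∧ chkKids nums g' c.toNat (i+2) = some (vals, ek, cs)
      ∧ ek + m ≤ (nums.length : Int)
      ∧ v = (if c = 0 then (PySem.List.slice nums (some ek) (some (ek+m))).sum else
              (PySem.List.slice nums (some ek) (some (ek+m))).foldl
                (fun acc x => if 0 < x ∧ x ≤ (vals.length : Int) then acc + vals.getD (x-1).toNat 0 else acc) 0)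
      ∧ e = ek + m ∧ cnt = 1 + cs := by
  cases g with
  | zero => simp [chkT] at h
  | succ g =>
    simp only [chkT] at h
    split at h
    case h_2 => exact absurd h (by simp)
    rename_i c m hp1 hp2
    split at h
    case isFalse => exact absurd h (by simp)
    rename_i hguard
    split at h
    case h_1 => exact absurd h (by simp)
    rename_i vals e' cs hk
    split at h
    case isFalse => exact absurd h (by simp)
    rename_i hlen
    rw [Option.some_inj, Prod.mk.injEq, Prod.mk.injEq] at h
    exact ⟨g, c, m, vals, e', cs, rfl, hp1, hp2, hguard, hk, hlen, h.1.symm, h.2.1.symm, h.2.2.symm⟩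

theorem chkKids_inv_zero (nums : List Int) (g : Nat) (p e : Int) (vs : List Int) (cs : Nat)
    (h : chkKids nums g 0 p = some (vs, e, cs)) : vs = [] ∧ e = p ∧ cs = 0 := by
  cases g with
  | zero => simp [chkKids] at h
  | succ g =>
    simp only [chkKids, Option.some_inj, Prod.mk.injEq] at h
    exact ⟨h.1.symm, h.2.1.symm, h.2.2.symm⟩

theorem chkKids_inv_succ (nums : List Int) (g k : Nat) (p e : Int) (vals : List Int) (cs : Nat)
    (h : chkKids nums g (k+1) p = some (vals, e, cs)) :
    ∃ g' v1 e1 c1 vs cs', g = g' + 1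
      ∧ chkT nums g' p = some (v1, e1, c1)
      ∧ chkKids nums g' k e1 = some (vs, e, cs')
      ∧ vals = v1 :: vs ∧ cs = c1 + cs' := by
  cases g with
  | zero => simp [chkKids] at h
  | succ g =>
    simp only [chkKids] at h
    split at h
    case h_1 => exact absurd h (by simp)
    rename_i v1 e1 c1 hT
    split at h
    case h_1 => exact absurd h (by simp)
    rename_i vs e' cs' hK
    rw [Option.some_inj, Prod.mk.injEq, Prod.mk.injEq] at h
    exact ⟨g, v1, e1, c1, vs, cs', rfl, hT, h.2.1 ▸ hK, h.1.symm, h.2.2.symm⟩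

-- Invariants of the checker: a well-formed node starts at a nonnegative position, spans at
-- least two slots per node, ends inside the buffer, and contains at least one node.
theorem chk_inv (nums : List Int) : ∀ f : Nat,
    (∀ i v e cnt, chkT nums f i = some (v, e, cnt) →
      0 ≤ i ∧ i + 2*(cnt : Int) ≤ e ∧ e ≤ (nums.length : Int) ∧ 1 ≤ cnt)
    ∧ (∀ k p vs e cs, chkKids nums f k p = some (vs, e, cs) →
      p + 2*(cs : Int) ≤ e ∧ vs.length = k ∧ (1 ≤ k → 0 ≤ p ∧ e ≤ (nums.length : Int))) := by
  intro f
  induction f with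
  | zero => exact ⟨fun i v e cnt h => by simp [chkT] at h, fun k p vs e cs h => by simp [chkKids] at h⟩
  | succ f ih =>
    constructor
    · intro i v e cnt h
      obtain ⟨g', c, m, vals, ek, cs, _, _, _, hguard, hk, hlen, _, he, hcnt⟩ := chkT_inv nums _ _ _ _ _ h
      have hK := (ih.2) _ _ _ _ _ (by
        have : g' = f := by omega
        rw [← this]; exact hk)
      subst he hcnt
      push_cast
      omega
    · intro k p vs e cs h
      cases k with
      | zero =>
        obtain ⟨rfl, rfl, rfl⟩ := chkKids_inv_zero nums _ _ _ _ _ h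
        simp
      | succ k =>
        obtain ⟨g', v1, e1, c1, vs', cs', hg, hT, hK, rfl, rfl⟩ := chkKids_inv_succ nums _ _ _ _ _ _ h
        have hgf : g' = f := by omega
        subst hgf
        have h1 := ih.1 _ _ _ _ hT
        have h2 := ih.2 _ _ _ _ _ hK
        refine ⟨by push_cast; omega, by simpa using h2.2.1, fun _ => ⟨h1.1, ?_⟩⟩
        cases k with
        | zero =>
          obtain ⟨rfl, rfl, rfl⟩ := chkKids_inv_zero nums _ _ _ _ _ hK
          exact h1.2.2.1
        | succ k => exact (h2.2.2 (by omega)).2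

-- The checker succeeds only where A's recursion (at the same fuel) returns the same pair.
theorem chk_goA (nums : List Int) : ∀ f : Nat,
    (∀ i v e cnt, chkT nums f i = some (v, e, cnt) → goA nums f i = some (v, e))
    ∧ (∀ k p vs e cs, chkKids nums f k p = some (vs, e, cs) → kidsA nums f k p = some (vs, e)) := by
  intro f
  induction f with
  | zero => exact ⟨fun i v e cnt h => by simp [chkT] at h, fun k p vs e cs h => by simp [chkKids] at h⟩
  | succ f ih =>
    constructor
    · intro i v e cnt h
      obtain ⟨g', c, m, vals, ek, cs, hg, hp1, hp2, hguard, hk, hlen, hv, he, hcnt⟩ := chkT_inv nums _ _ _ _ _ h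
      have hgf : g' = f := by omega
      subst hgf
      simp only [goA]
      rw [hp1, hp2]
      by_cases hc0 : c = 0
      · subst hc0
        simp only [Int.toNat_zero] at hk
        obtain ⟨rfl, rfl, rfl⟩ := chkKids_inv_zero nums _ _ _ _ _ hk
        subst hv he
        simp
      · have hA := ih.2 _ _ _ _ _ hk
        simp only [if_neg hc0]
        rw [hA]
        simp only [if_neg hc0] at hv
        rw [hv, he]
    · intro k p vs e cs h
      cases k with
      | zero =>
        obtain ⟨rfl, rfl, rfl⟩ := chkKids_inv_zero nums _ _ _ _ _ h
        simp [kidsA]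
      | succ k =>
        obtain ⟨g', v1, e1, c1, vs', cs', hg, hT, hK, rfl, rfl⟩ := chkKids_inv_succ nums _ _ _ _ _ _ h
        have hgf : g' = f := by omega
        subst hgf
        simp [kidsA, ih.1 _ _ _ _ hT, ih.2 _ _ _ _ _ hK]

-- What B's machine does after a whole subtree has been parsed, yielding value v at cursor e:
-- feed v to the enclosing frame and resolve, or stop if there is no enclosing frame.
def contB (nums : List Int) (v e : Int) (st : List (Int × Int × List Int)) (f : Nat) : Option (Int × Int) :=
  match st with
  | [] => some (v, e)
  | (c2, m2, v2) :: r2 =>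
    match resolveB nums e ((c2, m2, v2 ++ [v]) :: r2) with
    | Sum.inl a => some a
    | Sum.inr (p', s') => goB nums f p' s'

-- B's machine, run on a well-formed subtree (cnt nodes) above any stack, consumes exactly
-- cnt units of fuel, produces the subtree's value v and end cursor e, and continues as contB.
theorem goB_sim (nums : List Int) : ∀ F : Nat,
    (∀ g i v e cnt (st : List (Int × Int × List Int)) f, chkT nums g i = some (v, e, cnt) → F = f + cnt →
      goB nums F i st = contB nums v e st f)
    ∧ (∀ g k p vals e cs c2 m2 (acc : List Int) (st : List (Int × Int × List Int)) f,
        chkKids nums g k p = some (vals, e, cs) → F = f + cs →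
        (acc.length : Int) + (k : Int) = c2 → 1 ≤ k →
        goB nums F p ((c2, m2, acc) :: st) =
          (match resolveB nums e ((c2, m2, acc ++ vals) :: st) with
           | Sum.inl a => some a
           | Sum.inr (p', s') => goB nums f p' s')) := by
  intro F
  induction F using Nat.strong_induction_on with
  | _ F IH =>
    have node : ∀ g i v e cnt (st : List (Int × Int × List Int)) f,
        chkT nums g i = some (v, e, cnt) → F = f + cnt → goB nums F i st = contB nums v e st f := by
      intro g i v e cnt st f hchk hF
      obtain ⟨g', c, m, vals, ek, cs, hg, hp1, hp2, ⟨hi, hc, hm⟩, hk, hlen, hv, he, hcnt⟩ :=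
        chkT_inv nums _ _ _ _ _ hchk
      obtain ⟨F', rfl⟩ : ∃ F', F = F' + 1 := ⟨f + cs, by omega⟩
      have hF' : F' = f + cs := by omega
      rw [goB_succ_some nums F' i st c m hp1 hp2]
      by_cases hc0 : c = 0
      · -- leaf node: the freshly pushed frame completes at once
        subst hc0
        simp only [Int.toNat_zero] at hk
        obtain ⟨rfl, rfl, rfl⟩ := chkKids_inv_zero nums _ _ _ _ _ hk
        have hF'' : F' = f := by omega
        subst hF''
        rw [resolveB_cons, if_pos (by simp)]
        cases st with
        | nil => simp only [contB]; rw [hv, he]; simp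
        | cons top rest =>
          obtain ⟨a, b, vv⟩ := top
          simp only [contB]
          rw [hv, he]
          simp
      · -- internal node: frame stays, children are parsed by the kids lemma
        have hcpos : 0 < c := lt_of_le_of_ne hc (Ne.symm hc0)
        rw [resolveB_cons, if_neg (by simp; omega)]
        have hvl : vals.length = c.toNat := ((chk_inv nums g').2 _ _ _ _ _ hk).2.1
        have hkids := (IH F' (by omega)).2 g' c.toNat (i+2) vals ek cs c m [] st f hk (by omega)
          (by simp [Int.toNat_of_nonneg hc]) (by omega)
        simp only [List.nil_append] at hkids
        refine Eq.trans hkids ?_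
        rw [resolveB_cons, if_pos (by rw [hvl, Int.toNat_of_nonneg hc])]
        cases st with
        | nil => simp only [contB]; rw [hv, he]
        | cons top rest =>
          obtain ⟨a, b, vv⟩ := top
          simp only [contB]
          rw [hv, he]
    have kids : ∀ g k p vals e cs c2 m2 (acc : List Int) (st : List (Int × Int × List Int)) f,
        chkKids nums g k p = some (vals, e, cs) → F = f + cs →
        (acc.length : Int) + (k : Int) = c2 → 1 ≤ k →
        goB nums F p ((c2, m2, acc) :: st) =
          (match resolveB nums e ((c2, m2, acc ++ vals) :: st) with
           | Sum.inl a => some a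
           | Sum.inr (p', s') => goB nums f p' s') := by
      intro g k p vals e cs c2 m2 acc st f hk hF hlenk hk1
      obtain ⟨k', rfl⟩ : ∃ k', k = k' + 1 := ⟨k - 1, by omega⟩
      obtain ⟨g', v1, e1, c1, vs', cs', hg, hT, hK, rfl, rfl⟩ := chkKids_inv_succ nums _ _ _ _ _ _ hk
      have hc1 : 1 ≤ c1 := ((chk_inv nums g').1 _ _ _ _ hT).2.2.2
      have hnode := node g' p v1 e1 c1 ((c2, m2, acc) :: st) (f + cs') hT (by omega)
      rw [hnode]
      simp only [contB]
      cases k' with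
      | zero =>
        obtain ⟨rfl, rfl, rfl⟩ := chkKids_inv_zero nums _ _ _ _ _ hK
        simp
      | succ k'' =>
        rw [resolveB_cons, if_neg (by push_cast at hlenk ⊢; simp; omega)]
        have hrec := (IH (f + cs') (by omega)).2 g' (k'' + 1) e1 vs' e cs' c2 m2 (acc ++ [v1]) st f
          hK rfl (by push_cast at hlenk ⊢; simp; omega) (by omega)
        exact hrec.trans (by rw [List.append_assoc, List.singleton_append])
    exact ⟨node, kids⟩

-- ===== VERDICT (by name: the statement is the Claim_ definition above) =====
theorem root_value_at_spec : Claim_equal_root_value_at := by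
  intro i nums _ hpre
  unfold Spec_root_value_at
  obtain ⟨hs1, hs2, hroot⟩ := hpre
  obtain ⟨c, hp1⟩ := Option.isSome_iff_exists.mp hs1
  obtain ⟨m, hp2⟩ := Option.isSome_iff_exists.mp hs2
  rw [hp1] at hroot
  simp only [Option.getD_some] at hroot
  unfold root_value_at root_value_at_alt
  rw [show 2*nums.length+2 = (2*nums.length+1)+1 by omega,
      goA_succ_some nums (2*nums.length+1) i c m hp1 hp2,
      goB_succ_some nums nums.length i [] c m hp1 hp2,
      resolveB_cons]
  by_cases hcpos : 0 < c
  · -- root with a positive child count: Pre_ gives a well-formed child region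
    have hc0 : ¬ c = 0 := by omega
    have hkS : (chkKids nums (2*nums.length+1) c.toNat (i+2)).isSome = true := by
      rcases hroot with hc | hk
      · omega
      · exact hk
    obtain ⟨⟨vals, ek, cs⟩, hk⟩ := Option.isSome_iff_exists.mp hkS
    have hknat : 1 ≤ c.toNat := by omega
    obtain ⟨hprog, hvl, hbnd⟩ := (chk_inv nums _).2 _ _ _ _ _ hk
    obtain ⟨hp0, hek⟩ := hbnd hknat
    have hcs : cs ≤ nums.length := by omega
    rw [if_neg hc0, (chk_goA nums _).2 _ _ _ _ _ hk]
    rw [if_neg (by simp; omega)]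
    have hkids := (goB_sim nums nums.length).2 (2*nums.length+1) c.toNat (i+2) vals ek cs c m
      [] [] (nums.length - cs) hk (by omega) (by simp [Int.toNat_of_nonneg (le_of_lt hcpos)])
      hknat
    simp only [List.nil_append] at hkids
    refine Eq.trans ?_ (congrArg (fun o => Option.getD o (0,0)) hkids.symm)
    rw [resolveB_cons, if_pos (by rw [hvl, Int.toNat_of_nonneg (le_of_lt hcpos)]), if_neg hc0]
  · -- root with child count ≤ 0: both programs return straight from the header
    have hc : c ≤ 0 := by omega
    by_cases hc0 : c = 0
    · subst hc0
      simp
    · have htn : c.toNat = 0 := by omega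
      simp [hc0, htn, hc, kidsA]
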